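-- pv_equiv track=rewrite | github.com/JonathanFly/functional-ear-training | main.py | bt_text
-- ===== SOURCE A (Python) =====
-- def bt_text(ex_title):
--     hey = str()
--     for idx,item in enumerate(ex_title):
--         if idx==0:
--             hey += "[size=19]{}[/size]\n".format(item)
--         elif idx==1:
--             hey += "[b]{}[/b]\n".format(item)
--         elif idx==2:
--             hey += "{}\n".format(item)
--
--     return hey
-- ===== SOURCE B (Python) =====
-- def bt_text(ex_title):
--     # Closed-form case analysis on the list shape: only the first three items
--     # ever matter, so each shape maps directly to one complete output string.
--     match ex_title:
--         case []:
--             return ""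
--         case [a]:
--             return f"[size=19]{a}[/size]\n"
--         case [a, b]:
--             return f"[size=19]{a}[/size]\n[b]{b}[/b]\n"
--         case [a, b, c, *_]:
--             return f"[size=19]{a}[/size]\n[b]{b}[/b]\n{c}\n"
-- ===== Notes on version B (the rewrite author's own statement) =====
-- stated objective: simpler
-- what changed: Replaces the enumerate loop with an if/elif index ladder and string accumulator by a loop-free structural match on the list shape (0, 1, 2, or >=3 elements), each case returning the complete result as one f-string, never scanning past the third element.
import Mathlib
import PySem

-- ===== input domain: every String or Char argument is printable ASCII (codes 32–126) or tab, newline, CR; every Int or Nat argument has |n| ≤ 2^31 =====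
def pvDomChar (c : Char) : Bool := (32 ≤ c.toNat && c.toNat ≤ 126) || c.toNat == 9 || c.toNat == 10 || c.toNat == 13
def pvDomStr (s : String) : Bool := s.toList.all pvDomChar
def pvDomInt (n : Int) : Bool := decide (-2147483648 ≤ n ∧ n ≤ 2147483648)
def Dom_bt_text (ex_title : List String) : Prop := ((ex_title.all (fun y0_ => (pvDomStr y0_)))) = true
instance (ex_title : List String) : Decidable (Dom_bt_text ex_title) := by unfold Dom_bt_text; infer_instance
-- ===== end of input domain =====

-- B replaces A's enumerate+if/elif accumulator loop by a loop-free structural match on the list shape (simpler, same result).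


-- ===== PORT A =====
-- loop over enumerate(ex_title); "…{}…".format(item) is spelled out as prefix ++ item ++ suffix (exact for these literal templates)
def bt_text (ex_title : List String) : String :=
  (PySem.List.enumerate ex_title).foldl
    (fun hey p =>
      if p.1 == 0 then hey ++ ("[size=19]" ++ p.2 ++ "[/size]\n")
      else if p.1 == 1 then hey ++ ("[b]" ++ p.2 ++ "[/b]\n")
      else if p.1 == 2 then hey ++ (p.2 ++ "\n")
      else hey) ""

-- ===== PORT B =====
-- structural match on the list shape; each f-string becomes the corresponding concatenation
def bt_text_alt (ex_title : List String) : String :=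
  match ex_title with
  | [] => ""
  | [a] => "[size=19]" ++ a ++ "[/size]\n"
  | [a, b] => "[size=19]" ++ a ++ "[/size]\n[b]" ++ b ++ "[/b]\n"
  | a :: b :: c :: _ => "[size=19]" ++ a ++ "[/size]\n[b]" ++ b ++ "[/b]\n" ++ c ++ "\n"

-- ===== PRECONDITION & SPEC =====
def Spec_bt_text (ex_title : List String) (out : String) : Prop := out = bt_text_alt ex_title
instance (ex_title : List String) (out : String) : Decidable (Spec_bt_text ex_title out) := by unfold Spec_bt_text; infer_instance

-- ===== CLAIM =====
def Claim_equal_bt_text : Prop := ∀ (ex_title : List String), Dom_bt_text ex_title → Spec_bt_text ex_title (bt_text ex_title)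

-- ===== LEMMAS AND PROOFS =====
-- once the index reaches 3 or more, every iteration of A's loop leaves the accumulator unchanged
theorem bt_text_fold_noop (rest : List String) : ∀ (s : Int), 3 ≤ s → ∀ (acc : String),
    (PySem.List.enumerate rest s).foldl
      (fun hey p =>
        if p.1 == 0 then hey ++ ("[size=19]" ++ p.2 ++ "[/size]\n")
        else if p.1 == 1 then hey ++ ("[b]" ++ p.2 ++ "[/b]\n")
        else if p.1 == 2 then hey ++ (p.2 ++ "\n")
        else hey) acc = acc := by
  induction rest with
  | nil => intro s _ acc; simp [PySem.List.enumerate_nil]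
  | cons x xs ih =>
      intro s hs acc
      rw [PySem.List.enumerate_cons, List.foldl_cons]
      have h0 : (s == (0:Int)) = false := by simp; omega
      have h1 : (s == (1:Int)) = false := by simp; omega
      have h2 : (s == (2:Int)) = false := by simp; omega
      simp only [h0, h1, h2]
      exact ih (s+1) (by omega) acc

-- ===== VERDICT =====
theorem bt_text_spec : Claim_equal_bt_text := by
  intro ex_title _
  unfold Spec_bt_text
  match ex_title with
  | [] => rfl
  | [a] => simp [bt_text, bt_text_alt, PySem.List.enumerate_cons,
      PySem.List.enumerate_nil]
  | [a, b] =>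
      simp only [bt_text, bt_text_alt, PySem.List.enumerate_cons,
        PySem.List.enumerate_nil, List.foldl_cons, List.foldl_nil]
      norm_num
      rw [show ("[/size]\n[b]":String) = "[/size]\n" ++ "[b]" from rfl]
      simp only [String.append_assoc]
  | a :: b :: c :: rest =>
      show bt_text (a :: b :: c :: rest) = _
      unfold bt_text
      rw [PySem.List.enumerate_cons, PySem.List.enumerate_cons, PySem.List.enumerate_cons]
      rw [List.foldl_cons, List.foldl_cons, List.foldl_cons, bt_text_fold_noop rest (0+1+1+1) (by norm_num)]
      norm_num
      simp only [bt_text_alt]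
      rw [show ("[/size]\n[b]":String) = "[/size]\n" ++ "[b]" from rfl]
      simp only [String.append_assoc]
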